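-- pv_equiv track=rewrite | github.com/katherinekh/2020-2-level-labs | lab_2/main.py | find_diff_in_sentence
-- ===== SOURCE A (Python) =====
-- def find_diff_in_sentence(original_sentence_tokens: tuple, suspicious_sentence_tokens: tuple, lcs: tuple) -> tuple:
--     """
--     Finds words not present in lcs.
--     :param original_sentence_tokens: a tuple of tokens
--     :param suspicious_sentence_tokens: a tuple of tokens
--     :param lcs: a longest common subsequence
--     :return: a tuple with tuples of indexes
--     """
--     if (not isinstance(original_sentence_tokens, tuple) or
--             not isinstance(suspicious_sentence_tokens, tuple) or
--             not isinstance(lcs, tuple) or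
--             not all(isinstance(el, str) for el in original_sentence_tokens + suspicious_sentence_tokens + lcs)):
--         return ()
--
--     sentences = (original_sentence_tokens, suspicious_sentence_tokens)
--     diff = []
--
--     for sent in sentences:
--         diff_sub = []
--         for i, word in enumerate(sent):
--             if word not in lcs:
--                 if i == 0 or sent[i - 1] in lcs:
--                     diff_sub.append(i)
--                 if i == len(sent) - 1 or sent[i + 1] in lcs:
--                     diff_sub.append(i + 1)
--         diff.append(tuple(diff_sub))
--
--     diff = tuple(diff)
--     return diff
-- ===== SOURCE B (Python) =====
-- def find_diff_in_sentence(original_sentence_tokens: tuple, suspicious_sentence_tokens: tuple, lcs: tuple) -> tuple: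
--     """
--     Finds words not present in lcs, as run boundaries: scan each sentence
--     for maximal runs of words outside lcs and emit each run's start and end index.
--     """
--     if (not isinstance(original_sentence_tokens, tuple) or
--             not isinstance(suspicious_sentence_tokens, tuple) or
--             not isinstance(lcs, tuple) or
--             not all(isinstance(el, str) for el in original_sentence_tokens + suspicious_sentence_tokens + lcs)):
--         return ()
--
--     diff = []
--     for sent in (original_sentence_tokens, suspicious_sentence_tokens):
--         diff_sub = []
--         i = 0
--         n = len(sent)
--         while i < n:
--             if sent[i] in lcs:
--                 i += 1
--             else:
--                 j = i + 1
--                 while j < n and sent[j] not in lcs: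
--                     j += 1
--                 diff_sub.append(i)
--                 diff_sub.append(j)
--                 i = j
--         diff.append(tuple(diff_sub))
--     return tuple(diff)
-- ===== Notes on version B (the rewrite author's own statement) =====
-- stated objective: alternative
-- what changed: B replaces A's per-word neighbor checks (sent[i-1]/sent[i+1] membership tests deciding whether an index is a run boundary) with a two-pointer scan that finds each maximal run of words outside lcs and emits the run's start and end index directly.
import Mathlib
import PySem

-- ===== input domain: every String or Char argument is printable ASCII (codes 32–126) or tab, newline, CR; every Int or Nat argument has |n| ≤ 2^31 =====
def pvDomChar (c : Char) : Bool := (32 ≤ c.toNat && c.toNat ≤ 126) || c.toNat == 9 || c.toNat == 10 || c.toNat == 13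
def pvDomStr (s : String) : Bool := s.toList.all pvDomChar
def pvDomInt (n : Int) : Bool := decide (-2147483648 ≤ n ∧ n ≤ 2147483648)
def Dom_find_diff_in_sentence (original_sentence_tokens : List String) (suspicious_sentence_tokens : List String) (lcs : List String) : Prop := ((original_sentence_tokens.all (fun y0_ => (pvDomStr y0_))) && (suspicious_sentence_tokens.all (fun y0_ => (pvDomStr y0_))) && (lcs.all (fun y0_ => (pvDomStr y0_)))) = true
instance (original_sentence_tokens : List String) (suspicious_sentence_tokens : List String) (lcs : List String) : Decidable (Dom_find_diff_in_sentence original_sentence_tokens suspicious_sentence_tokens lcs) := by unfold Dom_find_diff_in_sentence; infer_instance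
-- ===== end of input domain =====

-- B replaces A's per-word neighbor checks with a two-pointer scan over maximal runs of
-- words outside lcs, emitting each run's start and end index ("alternative": same cost).

-- ===== PORT A =====
-- inner loop 'for i, word in enumerate(sent): …' of A; the sent[i-1] / sent[i+1]
-- accesses are guarded by the short-circuit disjunctions so they are always in range:
-- pyGetD's default "" is unreachable and the port is exact.
def fdisSub (sent lcs : List String) : List Int :=
  (PySem.List.enumerate sent 0).foldl
    (fun diff_sub iw =>
      if iw.2 ∈ lcs then diff_sub
      else
        let d1 := if iw.1 = 0 ∨ PySem.List.pyGetD sent (iw.1 - 1) "" ∈ lcs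
                  then diff_sub ++ [iw.1] else diff_sub
        if iw.1 = (sent.length : Int) - 1 ∨ PySem.List.pyGetD sent (iw.1 + 1) "" ∈ lcs
        then d1 ++ [iw.1 + 1] else d1)
    []

-- A's isinstance guard is always satisfied under these Lean types (tuples of strings),
-- so the early 'return ()' branch is unreachable; the sentences loop appends one
-- diff_sub per sentence.
def find_diff_in_sentence (original_sentence_tokens : List String) (suspicious_sentence_tokens : List String) (lcs : List String) : List (List Int) :=
  [fdisSub original_sentence_tokens lcs, fdisSub suspicious_sentence_tokens lcs]

-- ===== PORT B =====
-- B's 'while i < n' run scanner: skip words in lcs; at a word outside lcs, the inner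
-- 'while j < n and sent[j] not in lcs' scan (= takeWhile on the remaining suffix)
-- finds the run's extent, both boundaries are appended and i jumps to j.
def fdisRun (lcs : List String) : List String → Nat → List Int
  | [], _ => []
  | w :: rest, i =>
    if w ∈ lcs then fdisRun lcs rest (i + 1)
    else
      let k := (rest.takeWhile (fun x => decide (x ∉ lcs))).length
      (i : Int) :: ((i : Int) + 1 + (k : Int)) :: fdisRun lcs (rest.drop k) (i + 1 + k)
termination_by l _ => l.length
decreasing_by
  · simp
  · simp only [List.length_drop, List.length_cons]; omega

def find_diff_in_sentence_alt (original_sentence_tokens : List String) (suspicious_sentence_tokens : List String) (lcs : List String) : List (List Int) :=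
  [fdisRun lcs original_sentence_tokens 0, fdisRun lcs suspicious_sentence_tokens 0]

-- ===== PRECONDITION & SPEC =====
def Spec_find_diff_in_sentence (original_sentence_tokens : List String) (suspicious_sentence_tokens : List String) (lcs : List String) (out : List (List Int)) : Prop := out = find_diff_in_sentence_alt original_sentence_tokens suspicious_sentence_tokens lcs
instance (original_sentence_tokens : List String) (suspicious_sentence_tokens : List String) (lcs : List String) (out : List (List Int)) : Decidable (Spec_find_diff_in_sentence original_sentence_tokens suspicious_sentence_tokens lcs out) := by unfold Spec_find_diff_in_sentence; infer_instance

-- ===== CLAIM (what is proved, stated in full; the proofs are below) =====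
def Claim_equal_find_diff_in_sentence : Prop := ∀ (original_sentence_tokens : List String) (suspicious_sentence_tokens : List String) (lcs : List String), Dom_find_diff_in_sentence original_sentence_tokens suspicious_sentence_tokens lcs → Spec_find_diff_in_sentence original_sentence_tokens suspicious_sentence_tokens lcs (find_diff_in_sentence original_sentence_tokens suspicious_sentence_tokens lcs)

-- ===== LEMMAS AND PROOFS =====

-- 'next word is in lcs, or we are at the end of the sentence' (the close-boundary test).
def headIn (lcs : List String) : List String → Bool
  | [] => true
  | x :: _ => decide (x ∈ lcs)

-- Common mid-level specification: structural recursion over the sentence carrying the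
-- index n and a flag p = 'position n opens a run' (n = 0 or the previous word is in lcs).
def midSpec (lcs : List String) : Bool → Nat → List String → List Int
  | _, _, [] => []
  | p, n, w :: rest =>
    if w ∈ lcs then midSpec lcs true (n + 1) rest
    else (if p then [(n : Int)] else []) ++ (if headIn lcs rest then [(n : Int) + 1] else [])
         ++ midSpec lcs false (n + 1) rest

-- What A's loop body appends for one enumerated element.
def emitA (sent lcs : List String) (iw : Int × String) : List Int :=
  if iw.2 ∈ lcs then []
  else (if iw.1 = 0 ∨ PySem.List.pyGetD sent (iw.1 - 1) "" ∈ lcs then [iw.1] else []) ++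
       (if iw.1 = (sent.length : Int) - 1 ∨ PySem.List.pyGetD sent (iw.1 + 1) "" ∈ lcs
        then [iw.1 + 1] else [])

theorem fdisSub_eq_flatMap (sent lcs : List String) :
    fdisSub sent lcs = (PySem.List.enumerate sent 0).flatMap (emitA sent lcs) := by
  unfold fdisSub
  refine (PySem.List.foldl_congr_mem' _ _ (fun acc iw => acc ++ emitA sent lcs iw) _ ?_).trans ?_
  · intro x hx acc
    simp only [emitA]
    split_ifs <;> simp
  · rw [PySem.List.foldl_append_eq_flatMap]
    simp

theorem flatMap_emitA_eq_midSpec (sent lcs : List String) :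
    ∀ (suffix : List String) (j : Nat), sent.drop j = suffix →
      (PySem.List.enumerate suffix (j : Int)).flatMap (emitA sent lcs)
        = midSpec lcs (decide ((j : Int) = 0 ∨ PySem.List.pyGetD sent ((j : Int) - 1) "" ∈ lcs)) j suffix := by
  intro suffix
  induction suffix with
  | nil => intro j _; simp [PySem.List.enumerate_nil, midSpec]
  | cons w rest ih =>
    intro j hd
    have hlen : sent.length = j + 1 + rest.length := by
      have := congrArg List.length hd
      simp [List.length_drop] at this
      omega
    have hget : sent[j]? = some w := by
      have h0 : (sent.drop j)[0]? = sent[j + 0]? := List.getElem?_drop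
      rw [hd] at h0; simpa using h0.symm
    have hdrop1 : sent.drop (j + 1) = rest := by
      have : (sent.drop j).drop 1 = sent.drop (j + 1) := by
        rw [List.drop_drop]
      rw [hd] at this; simpa using this.symm
    have hflag : (decide (((j : Nat) + 1 : Int) = 0 ∨ PySem.List.pyGetD sent (((j : Nat) + 1 : Int) - 1) "" ∈ lcs)) = decide (w ∈ lcs) := by
      have h1 : ((j : Nat) + 1 : Int) - 1 = ((j : Nat) : Int) := by ring
      have h2 : PySem.List.pyGetD sent ((j : Nat) : Int) "" = w := by
        rw [PySem.List.pyGetD_natCast]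
        simp [List.getD, hget]
      have h3 : ¬ (((j : Nat) : Int) + 1 = 0) := by omega
      simp [h1, h2, h3]
    rw [PySem.List.enumerate_cons]
    rw [List.flatMap_cons]
    have ihj := ih (j + 1) hdrop1
    push_cast at ihj ⊢
    by_cases hw : w ∈ lcs
    · simp only [midSpec, emitA, if_pos hw]
      rw [hflag] at ihj
      simp [hw] at ihj
      simpa using ihj
    · simp only [midSpec, emitA, if_neg hw]
      rw [hflag] at ihj
      simp [hw] at ihj
      have hc2 : ((j : Int) = (sent.length : Int) - 1 ∨ PySem.List.pyGetD sent ((j : Int) + 1) "" ∈ lcs)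
          ↔ headIn lcs rest = true := by
        cases rest with
        | nil =>
          have hj : (j : Int) = (sent.length : Int) - 1 := by
            simp at hlen; simp [hlen]
          simp [headIn, hj]
        | cons x rst =>
          have hne : ¬ ((j : Int) = (sent.length : Int) - 1) := by
            simp [hlen]; omega
          have hx : PySem.List.pyGetD sent ((j : Int) + 1) "" = x := by
            have hgx : sent[j + 1]? = some x := by
              have h0 : (sent.drop (j + 1))[0]? = sent[(j + 1) + 0]? := List.getElem?_drop
              rw [hdrop1] at h0; simpa using h0.symm
            have : ((j : Int) + 1) = ((j + 1 : Nat) : Int) := by push_cast; ring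
            rw [this, PySem.List.pyGetD_natCast]
            simp [List.getD, hgx]
          simp [headIn, hne, hx]
      rw [ihj]
      by_cases hp : ((j : Int) = 0 ∨ PySem.List.pyGetD sent ((j : Int) - 1) "" ∈ lcs) <;>
        by_cases hh : headIn lcs rest = true <;>
          simp [hh, hc2]

-- close-boundary bookkeeping for B: after a run has been opened, the pending close
-- emission plus the rest of the flag-false recursion equals 'close at start + run length,
-- then restart at the first word back in lcs'.
theorem midSpec_false_run (lcs : List String) :
    ∀ (rest : List String) (m : Nat),
      (if headIn lcs rest then [(m : Int) + 1] else []) ++ midSpec lcs false (m + 1) rest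
        = ((m : Int) + 1 + ((rest.takeWhile (fun x => decide (x ∉ lcs))).length : Int))
            :: midSpec lcs true (m + 1 + (rest.takeWhile (fun x => decide (x ∉ lcs))).length)
                 (rest.drop (rest.takeWhile (fun x => decide (x ∉ lcs))).length) := by
  intro rest
  induction rest with
  | nil => intro m; simp [headIn, midSpec]
  | cons x rst ih =>
    intro m
    by_cases hx : x ∈ lcs
    · simp [headIn, hx, List.takeWhile, midSpec]
    · have htw : (x :: rst).takeWhile (fun x => decide (x ∉ lcs))
          = x :: rst.takeWhile (fun x => decide (x ∉ lcs)) := by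
        simp [List.takeWhile, hx]
      have hh0 : headIn lcs (x :: rst) = false := by simp [headIn, hx]
      rw [htw, hh0]
      simp only [Bool.false_eq_true, if_false, List.nil_append, List.length_cons,
        List.drop_succ_cons]
      rw [midSpec, if_neg hx]
      simp only [Bool.false_eq_true, if_false, List.nil_append]
      rw [ih (m + 1)]
      have harg : m + 1 + 1 + (rst.takeWhile (fun x => decide (x ∉ lcs))).length
          = m + 1 + ((rst.takeWhile (fun x => decide (x ∉ lcs))).length + 1) := by omega
      rw [harg]
      congr 1
      push_cast
      ring

theorem fdisRun_eq_midSpec (lcs : List String) :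
    ∀ (sent : List String) (i : Nat), fdisRun lcs sent i = midSpec lcs true i sent := by
  intro sent i
  induction sent, i using fdisRun.induct lcs with
  | case1 i => simp [fdisRun, midSpec]
  | case2 w rest i hw ih =>
    rw [fdisRun, if_pos hw]
    simp [midSpec, hw, ih]
  | case3 w rest i hw k ih =>
    rw [fdisRun, if_neg hw]
    simp only [midSpec, if_neg hw]
    rw [ih]
    rw [← midSpec_false_run lcs rest i]
    simp

theorem fdisSub_eq_fdisRun (sent lcs : List String) :
    fdisSub sent lcs = fdisRun lcs sent 0 := by
  rw [fdisSub_eq_flatMap]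
  have h := flatMap_emitA_eq_midSpec sent lcs sent 0 (by simp)
  simp only [Nat.cast_zero] at h
  rw [h, fdisRun_eq_midSpec]
  simp

-- ===== VERDICT (by name: the statement is the Claim_ definition above) =====
theorem find_diff_in_sentence_spec : Claim_equal_find_diff_in_sentence := by
  intro o s lcs _
  unfold Spec_find_diff_in_sentence find_diff_in_sentence find_diff_in_sentence_alt
  rw [fdisSub_eq_fdisRun, fdisSub_eq_fdisRun]
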